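-- pv_equiv track=rewrite | github.com/lucaimbalzano/pdr.aribnb.house-network | airbnb_url/url_assembler.py | get_query_url_with_percetange
-- ===== SOURCE A (Python) =====
-- def split_str(s):
--   return list(s)
--
-- def get_query_url_with_percetange(address_with_dash):
--     address_splitted = split_str(address_with_dash)
--     url_percentage = ''
--     for i in range(len(address_splitted)):
--         if(i+1<len(address_splitted)):
--             if(address_splitted[i] == '-' and address_splitted[i+1] == '-'):
--                 address_splitted[i] = '%2C'
--                 address_splitted[i+1] == '%20'
--         if(address_splitted[i] == '-'):
--             address_splitted[i] = '%20'
--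
--     for j in range(len(address_splitted)):
--         url_percentage = url_percentage + address_splitted[j]
--
--     return url_percentage
-- ===== SOURCE B (Python) =====
-- def get_query_url_with_percetange(address_with_dash):
--     # Split on '-': every boundary is one dash.  A dash is followed by another
--     # dash exactly when the part after it is empty and it is not the last
--     # boundary, so middle separators become '%2C' for an empty next part and
--     # '%20' otherwise; the final separator is always '%20'.
--     parts = address_with_dash.split('-')
--     if len(parts) == 1:
--         return address_with_dash
--     pieces = [parts[0]]
--     for p in parts[1:-1]:
--         pieces.append('%2C' if p == '' else '%20')
--         pieces.append(p)
--     pieces.append('%20')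
--     pieces.append(parts[-1])
--     return ''.join(pieces)
-- ===== Notes on version B (the rewrite author's own statement) =====
-- stated objective: faster
-- what changed: Replaced A's index loop with lookahead mutation plus a quadratic string-concatenation loop by a split-on-dash algorithm: split the string into dash-free parts and rebuild it, choosing '%2C' for a middle separator whose following part is empty and '%20' otherwise, joined once at the end.
import Mathlib
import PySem

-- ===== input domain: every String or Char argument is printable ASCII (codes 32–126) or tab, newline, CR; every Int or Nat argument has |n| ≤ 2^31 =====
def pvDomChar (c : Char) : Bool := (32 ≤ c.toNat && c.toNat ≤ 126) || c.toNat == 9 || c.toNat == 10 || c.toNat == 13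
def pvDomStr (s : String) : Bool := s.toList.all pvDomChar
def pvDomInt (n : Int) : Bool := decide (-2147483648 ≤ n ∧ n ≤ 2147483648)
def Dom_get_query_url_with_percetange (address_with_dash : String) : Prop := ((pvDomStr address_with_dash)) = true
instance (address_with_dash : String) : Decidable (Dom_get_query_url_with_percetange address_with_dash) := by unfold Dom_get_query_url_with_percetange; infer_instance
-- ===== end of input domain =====

-- B replaces A's index loop (lookahead mutation of a char list, then a concatenation loop)
-- by a split-on-dash algorithm: split into dash-free parts, rebuild with the right separators, join once (objective: faster, measured).

-- ===== PORT A =====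
def split_str (s : String) : List String := s.toList.map (fun c => String.ofList [c])

-- second `if` of A's first loop body (over index i, list mutated in place)
def pvStepA2 (l : List String) (i : Nat) : List String :=
  if l.getD i "" = "-" then l.set i "%20" else l

-- one iteration of A's first for-loop
def pvStepA (l : List String) (i : Nat) : List String :=
  pvStepA2
    (if i + 1 < l.length ∧ l.getD i "" = "-" ∧ l.getD (i + 1) "" = "-" then
        l.set i "%2C" else l) i

def get_query_url_with_percetange (address_with_dash : String) : String :=
  let address_splitted := split_str address_with_dash
  let address_splitted := (List.range address_splitted.length).foldl pvStepA address_splitted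
  (List.range address_splitted.length).foldl
    (fun url_percentage j => url_percentage ++ address_splitted.getD j "") ""

-- ===== PORT B =====
def get_query_url_with_percetange_alt (address_with_dash : String) : String :=
  -- '-' is a nonempty separator, so Python's split never raises; the getD default is never taken
  let parts := (PySem.Str.split? address_with_dash "-").getD []
  if parts.length = 1 then address_with_dash
  else
    let pieces := [PySem.List.pyGetD parts 0 ""]
    let pieces := (PySem.List.slice parts (some 1) (some (-1))).foldl
        (fun pieces p => pieces ++ [if p = "" then "%2C" else "%20", p]) pieces
    let pieces := pieces ++ ["%20", PySem.List.pyGetD parts (-1) ""]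
    PySem.Str.join "" pieces

-- ===== PRECONDITION & SPEC =====
def Spec_get_query_url_with_percetange (address_with_dash : String) (out : String) : Prop := out = get_query_url_with_percetange_alt address_with_dash
instance (address_with_dash : String) (out : String) : Decidable (Spec_get_query_url_with_percetange address_with_dash out) := by unfold Spec_get_query_url_with_percetange; infer_instance

-- ===== CLAIM (what is proved, stated in full; the proofs are below) =====
def Claim_equal_get_query_url_with_percetange : Prop := ∀ (address_with_dash : String), Dom_get_query_url_with_percetange address_with_dash → Spec_get_query_url_with_percetange address_with_dash (get_query_url_with_percetange address_with_dash)

-- ===== LEMMAS AND PROOFS =====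

-- the common value both programs compute at each position: one-char lookahead
def pvSing (c : Char) : String := String.ofList [c]

def pvNextMap : List Char → List String
  | [] => []
  | c :: rest =>
      (if c = '-' ∧ rest.head? = some '-' then "%2C"
       else if c = '-' then "%20" else pvSing c) :: pvNextMap rest

theorem pvNextMap_length (cs : List Char) : (pvNextMap cs).length = cs.length := by
  induction cs with
  | nil => rfl
  | cons c rest ih => simp [pvNextMap, ih]

theorem pvNextMap_getElem (cs : List Char) (k : Nat) (hk : k < cs.length) :
    (pvNextMap cs)[k]'(by rw [pvNextMap_length]; exact hk) =
      (if cs[k] = '-' ∧ cs[k + 1]? = some '-' then "%2C"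
       else if cs[k] = '-' then "%20" else pvSing cs[k]) := by
  induction cs generalizing k with
  | nil => simp at hk
  | cons c rest ih =>
      cases k with
      | zero => simp [pvNextMap, List.head?_eq_getElem?]
      | succ k => simpa [pvNextMap] using ih k (by simpa using hk)

theorem pvSing_eq_dash_iff (c : Char) : pvSing c = "-" ↔ c = '-' := by
  constructor
  · intro h
    have h2 : (pvSing c).toList = "-".toList := by rw [h]
    simpa [pvSing] using h2
  · intro h; simp [pvSing, h]

-- invariant of A's first loop: after k iterations the prefix is pvNextMap, the rest untouched
theorem pvLoopA_inv (cs : List Char) (k : Nat) (hk : k ≤ cs.length) :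
    (List.range k).foldl pvStepA (cs.map pvSing)
      = (pvNextMap cs).take k ++ (cs.map pvSing).drop k := by
  induction k with
  | zero => simp
  | succ k ih =>
      have hk' : k < cs.length := hk
      have hkle : k ≤ cs.length := Nat.le_of_lt hk'
      rw [List.range_succ, List.foldl_append, ih hkle, List.foldl_cons, List.foldl_nil]
      set tk := (pvNextMap cs).take k with htk
      set dk1 := (cs.map pvSing).drop (k + 1) with hdk1
      have hlen_tk : tk.length = k := by
        simp [htk, pvNextMap_length, Nat.min_eq_left hkle]
      have hdrop : (cs.map pvSing).drop k = pvSing cs[k] :: dk1 := by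
        rw [List.drop_eq_getElem_cons (by simpa using hk')]
        simp [hdk1]
      set l : List String := tk ++ pvSing cs[k] :: dk1 with hl
      have hlen_all : l.length = cs.length := by
        simp [hl, hlen_tk, hdk1]; omega
      have htake : (pvNextMap cs).take (k + 1)
          = tk ++ [(pvNextMap cs)[k]'(by rw [pvNextMap_length]; exact hk')] := by
        rw [htk, List.take_add_one]
        simp [List.getElem?_eq_getElem (show k < (pvNextMap cs).length by rw [pvNextMap_length]; exact hk')]
      rw [hdrop, htake, pvNextMap_getElem cs k hk', List.append_assoc, List.singleton_append]
      have hgetk : l.getD k "" = pvSing cs[k] := by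
        rw [hl, List.getD_eq_getElem?_getD, List.getElem?_append_right (by omega)]
        simp [hlen_tk]
      have hget1 : ∀ (hlt : k + 1 < cs.length), l.getD (k + 1) "" = pvSing (cs[k + 1]'hlt) := by
        intro hlt
        rw [hl, List.getD_eq_getElem?_getD, List.getElem?_append_right (by omega)]
        have h1 : k + 1 - tk.length = 1 := by omega
        have h2 : cs[k + 1]? = some cs[k + 1] := List.getElem?_eq_getElem hlt
        simp [h1, hdk1, List.getElem?_drop, show k + 1 + 0 = k + 1 from rfl, h2]
      have hsetk : ∀ v, l.set k v = tk ++ v :: dk1 := by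
        intro v
        rw [hl, List.set_append_right _ _ (by omega)]
        simp [hlen_tk]
      by_cases hc : cs[k] = '-'
      · by_cases hnext : k + 1 < cs.length ∧ cs[k + 1]? = some '-'
        · -- '-' followed by '-': first if fires, second does not
          obtain ⟨hlt, hval⟩ := hnext
          have hc1 : cs[k + 1] = '-' := by
            have h2 : cs[k + 1]? = some cs[k + 1] := List.getElem?_eq_getElem hlt
            rw [h2] at hval; exact Option.some.inj hval
          have cond1 : k + 1 < l.length ∧ l.getD k "" = "-" ∧ l.getD (k + 1) "" = "-" :=
            ⟨by rw [hlen_all]; exact hlt,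
             by rw [hgetk, pvSing_eq_dash_iff]; exact hc,
             by rw [hget1 hlt, pvSing_eq_dash_iff]; exact hc1⟩
          rw [pvStepA, if_pos cond1, hsetk "%2C", pvStepA2]
          have hget2 : (tk ++ ("%2C" : String) :: dk1).getD k "" = "%2C" := by
            rw [List.getD_eq_getElem?_getD, List.getElem?_append_right (by omega)]
            simp [hlen_tk]
          rw [if_neg (by rw [hget2]; decide), if_pos ⟨hc, hval⟩]
        · -- lone '-': first if silent, second sets "%20"
          have hval' : ¬ cs[k + 1]? = some '-' := by
            intro hv
            apply hnext
            refine ⟨?_, hv⟩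
            by_contra hge
            have : cs[k + 1]? = none := List.getElem?_eq_none (by omega)
            rw [this] at hv; simp at hv
          have cond1f : ¬ (k + 1 < l.length ∧ l.getD k "" = "-" ∧ l.getD (k + 1) "" = "-") := by
            rintro ⟨h1, -, h3⟩
            rw [hlen_all] at h1
            rw [hget1 h1, pvSing_eq_dash_iff] at h3
            exact hval' (by rw [List.getElem?_eq_getElem h1, h3])
          rw [pvStepA, if_neg cond1f, pvStepA2,
            if_pos (by rw [hgetk, pvSing_eq_dash_iff]; exact hc), hsetk "%20",
            if_neg (fun h => hval' h.2), if_pos hc]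
      · -- not a dash: nothing happens
        have cond1f : ¬ (k + 1 < l.length ∧ l.getD k "" = "-" ∧ l.getD (k + 1) "" = "-") := by
          rintro ⟨-, h2, -⟩
          rw [hgetk, pvSing_eq_dash_iff] at h2; exact hc h2
        rw [pvStepA, if_neg cond1f, pvStepA2,
          if_neg (by rw [hgetk, pvSing_eq_dash_iff]; exact hc),
          if_neg (fun h => hc h.1), if_neg hc]

theorem pvRangeGetD (l : List String) :
    (List.range l.length).map (fun j => l.getD j "") = l := by
  apply List.ext_getElem
  · simp
  · intro i h1 h2
    simp [List.getD_eq_getElem?_getD, List.getElem?_eq_getElem h2]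

theorem pvConcat_eq (l : List String) :
    (List.range l.length).foldl (fun acc j => acc ++ l.getD j "") "" = l.foldl (· ++ ·) "" := by
  have h := List.foldl_map (f := fun j => l.getD j "") (g := fun (a b : String) => a ++ b)
    (l := List.range l.length) (init := "")
  rw [pvRangeGetD] at h
  exact h.symm

theorem pvIntercalateNil : ∀ (xs : List (List Char)), List.intercalate [] xs = xs.flatten
  | [] => by simp [List.intercalate]
  | [a] => by simp [List.intercalate]
  | a :: b :: t => by
      have ih := pvIntercalateNil (b :: t)
      simp [List.intercalate, List.intersperse] at ih ⊢
      simpa using ih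

theorem pvFoldlAppend_toList (parts : List String) (acc : String) :
    (parts.foldl (· ++ ·) acc).toList = acc.toList ++ (parts.map String.toList).flatten := by
  induction parts generalizing acc with
  | nil => simp
  | cons p rest ih => simp [List.foldl_cons, ih, String.toList_append]

theorem pvMainA (cs : List Char) :
    (List.range (cs.map (fun c => String.ofList [c])).length).foldl pvStepA
        (cs.map (fun c => String.ofList [c])) = pvNextMap cs := by
  have h : cs.map (fun c => String.ofList [c]) = cs.map pvSing := rfl
  have htakeall : (pvNextMap cs).take cs.length = pvNextMap cs := by
    rw [← pvNextMap_length cs]; simp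
  have hdrop0 : (cs.map pvSing).drop cs.length = [] := by simp
  rw [h, List.length_map, pvLoopA_inv cs cs.length le_rfl, htakeall, hdrop0, List.append_nil]

-- A's result, char by char
def pvNextOut : List Char → List Char
  | [] => []
  | c :: rest =>
      (if c = '-' ∧ rest.head? = some '-' then "%2C".toList
       else if c = '-' then "%20".toList else [c]) ++ pvNextOut rest

theorem pvFlatten_nextMap (cs : List Char) :
    ((pvNextMap cs).map String.toList).flatten = pvNextOut cs := by
  induction cs with
  | nil => rfl
  | cons c rest ih =>
      simp only [pvNextMap, pvNextOut, List.map_cons, List.flatten_cons, ih]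
      split_ifs <;> simp [pvSing]

theorem pvA_toList (s : String) :
    (get_query_url_with_percetange s).toList = pvNextOut s.toList := by
  unfold get_query_url_with_percetange split_str
  dsimp only
  rw [pvMainA s.toList, pvConcat_eq, pvFoldlAppend_toList]
  simpa using pvFlatten_nextMap s.toList

-- B's split, characterised structurally (single-char separator '-')
def pvSplit1 : List Char → List (List Char)
  | [] => [[]]
  | c :: rest =>
      if c = '-' then [] :: pvSplit1 rest
      else match pvSplit1 rest with
           | [] => [[c]]
           | p :: ps => (c :: p) :: ps

theorem pvSplit1_ne_nil (cs : List Char) : pvSplit1 cs ≠ [] := by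
  induction cs with
  | nil => simp [pvSplit1]
  | cons c rest ih =>
      simp only [pvSplit1]
      split_ifs
      · simp
      · cases h : pvSplit1 rest <;> simp

theorem pvGo (fuel : Nat) (l cur : List Char) (acc : List (List Char)) (h : l.length < fuel) :
    PySem.Chars.splitOn.go ['-'] fuel l cur acc
      = acc.reverse ++ (cur.reverse ++ (pvSplit1 l).headD []) :: (pvSplit1 l).tail := by
  induction fuel generalizing l cur acc with
  | zero => omega
  | succ fuel ih =>
      cases l with
      | nil => simp [PySem.Chars.splitOn.go, pvSplit1]
      | cons c rest =>
          rw [PySem.Chars.splitOn.go]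
          by_cases hc : c = '-'
          · have hpre : List.isPrefixOf ['-'] (c :: rest) = true := by
              simp [List.isPrefixOf, hc]
            rw [if_pos hpre]
            simp only [List.length_cons, List.length_nil, List.drop_succ_cons, List.drop_zero]
            rw [ih rest [] (cur.reverse :: acc) (by simpa using Nat.lt_of_succ_lt_succ h)]
            simp only [pvSplit1, if_pos hc]
            cases hsp : pvSplit1 rest with
            | nil => exact absurd hsp (pvSplit1_ne_nil rest)
            | cons p ps => simp
          · have hpre : List.isPrefixOf ['-'] (c :: rest) = false := by
              simp [List.isPrefixOf]; exact fun hh => (hc hh.symm).elim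
            rw [if_neg (by simp [hpre])]
            rw [ih rest (c :: cur) acc (by simpa using Nat.lt_of_succ_lt_succ h)]
            simp only [pvSplit1, if_neg hc]
            cases hsp : pvSplit1 rest with
            | nil => exact absurd hsp (pvSplit1_ne_nil rest)
            | cons p ps => simp

theorem pvSplitOn_eq (cs : List Char) : PySem.Chars.splitOn cs ['-'] = pvSplit1 cs := by
  rw [PySem.Chars.splitOn, pvGo _ _ _ _ (by omega)]
  cases h : pvSplit1 cs with
  | nil => exact absurd h (pvSplit1_ne_nil cs)
  | cons p ps => simp

theorem pvSplit1_no_dash (cs : List Char) : ∀ p ∈ pvSplit1 cs, '-' ∉ p := by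
  induction cs with
  | nil => simp [pvSplit1]
  | cons c rest ih =>
      simp only [pvSplit1]
      split_ifs with hc
      · intro p hp
        rcases List.mem_cons.mp hp with h | h
        · simp [h]
        · exact ih p h
      · cases hsp : pvSplit1 rest with
        | nil => exact absurd hsp (pvSplit1_ne_nil rest)
        | cons q qs =>
            intro p hp
            rcases List.mem_cons.mp hp with h | h
            · subst h
              intro hmem
              rcases List.mem_cons.mp hmem with h | h
              · exact hc h.symm
              · exact ih q (by rw [hsp]; exact List.mem_cons_self) h
            · exact ih p (by rw [hsp]; exact List.mem_cons_of_mem q h)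

theorem pvIntercalate_cons_cons (sep a b : List Char) (t : List (List Char)) :
    List.intercalate sep (a :: b :: t) = a ++ sep ++ List.intercalate sep (b :: t) := by
  simp [List.intercalate, List.intersperse]

theorem pvIntercalate_split1 (cs : List Char) : List.intercalate ['-'] (pvSplit1 cs) = cs := by
  induction cs with
  | nil => simp [pvSplit1, List.intercalate]
  | cons c rest ih =>
      simp only [pvSplit1]
      split_ifs with hc
      · cases hsp : pvSplit1 rest with
        | nil => exact absurd hsp (pvSplit1_ne_nil rest)
        | cons q qs =>
            rw [hsp] at ih
            rw [pvIntercalate_cons_cons, ih.symm] at *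
            simp [hc]
      · cases hsp : pvSplit1 rest with
        | nil => exact absurd hsp (pvSplit1_ne_nil rest)
        | cons q qs =>
            rw [hsp] at ih
            cases qs with
            | nil => simp_all [List.intercalate]
            | cons r rs =>
                rw [pvIntercalate_cons_cons] at ih ⊢
                simp [← ih]

theorem pvNextOut_append_no_dash (p t : List Char) (hp : '-' ∉ p) :
    pvNextOut (p ++ t) = p ++ pvNextOut t := by
  induction p with
  | nil => simp
  | cons c q ih =>
      have hc : c ≠ '-' := fun h => hp (h ▸ List.mem_cons_self)
      have hq : '-' ∉ q := fun h => hp (List.mem_cons_of_mem c h)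
      simp [pvNextOut, hc, ih hq]

-- the separators-and-parts shape of the output, over the parts after the first
def pvGlue : List (List Char) → List Char
  | [] => []
  | q :: rest =>
      (if q = [] ∧ rest ≠ [] then "%2C".toList else "%20".toList) ++ q ++ pvGlue rest

theorem pvMainChar (rest : List (List Char)) (p : List Char) (hp : '-' ∉ p)
    (hrest : ∀ q ∈ rest, '-' ∉ q) :
    pvNextOut (List.intercalate ['-'] (p :: rest)) = p ++ pvGlue rest := by
  induction rest generalizing p with
  | nil =>
      have h1 : List.intercalate ['-'] [p] = p := by simp [List.intercalate]
      rw [h1, pvGlue]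
      have h2 := pvNextOut_append_no_dash p [] hp
      simpa [pvNextOut] using h2
  | cons q rest' ih =>
      rw [pvIntercalate_cons_cons, List.append_assoc,
        pvNextOut_append_no_dash p _ hp]
      have hq : '-' ∉ q := hrest q List.mem_cons_self
      have hrest' : ∀ r ∈ rest', '-' ∉ r := fun r hr => hrest r (List.mem_cons_of_mem q hr)
      have hhead : (List.intercalate ['-'] (q :: rest')).head? = some '-' ↔ (q = [] ∧ rest' ≠ []) := by
        cases q with
        | nil =>
            cases rest' with
            | nil => simp [List.intercalate]
            | cons r rs => rw [pvIntercalate_cons_cons]; simp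
        | cons c cq =>
            have hc : c ≠ '-' := fun h => hq (h ▸ List.mem_cons_self)
            cases rest' with
            | nil => simp [List.intercalate, hc]
            | cons r rs => rw [pvIntercalate_cons_cons]; simp [hc]
      congr 1
      show pvNextOut ('-' :: List.intercalate ['-'] (q :: rest')) = _
      rw [pvNextOut, ih q hq hrest']
      rw [pvGlue]
      by_cases hcond : q = [] ∧ rest' ≠ []
      · rw [if_pos (by simp [hhead.mpr hcond]), if_pos hcond]; simp
      · rw [if_neg (by simp; intro hh; exact absurd (hhead.mp hh) hcond), if_pos rfl, if_neg hcond]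
        simp

theorem pvGlue_eq (t : List (List Char)) (ht : t ≠ []) :
    pvGlue t = (t.dropLast.flatMap (fun q => (if q = [] then "%2C".toList else "%20".toList) ++ q))
      ++ "%20".toList ++ t.getLastD [] := by
  induction t with
  | nil => exact absurd rfl ht
  | cons q rest ih =>
      cases rest with
      | nil => simp [pvGlue]
      | cons r rs =>
          rw [pvGlue, ih (by simp)]
          simp [List.dropLast_cons_of_ne_nil]

-- PySem slice / pyGetD bridges for B's parts[1:-1], parts[0], parts[-1]
theorem pvSlice_mid {α : Type} (xs : List α) :
    PySem.List.slice xs (some 1) (some (-1)) = xs.tail.dropLast := by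
  cases xs with
  | nil => rfl
  | cons x t =>
      simp only [PySem.List.slice, PySem.List.clampIdx, List.length_cons]
      rw [List.dropLast_eq_take]
      split_ifs with h1 h2 h3 <;> try omega
      all_goals simp_all

theorem pvGetD0 {α : Type} (x : α) (t : List α) (d : α) :
    PySem.List.pyGetD (x :: t) 0 d = x := by
  simp [PySem.List.pyGetD, PySem.List.pyGet?, PySem.List.pyIdx?]

theorem pvGetDneg1 {α : Type} (xs : List α) (d : α) (h : xs ≠ []) :
    PySem.List.pyGetD xs (-1) d = xs.getLastD d := by
  simp only [PySem.List.pyGetD, PySem.List.pyGet?, PySem.List.pyIdx?]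
  have hl : 0 < xs.length := List.length_pos_iff.mpr h
  rw [if_neg (by omega), if_pos (by simp; omega)]
  simp only [Option.bind]
  rw [show ((-(-1 : Int)).toNat) = 1 from rfl]
  rw [List.getElem?_eq_getElem (by omega)]
  rw [List.getLastD_eq_getLast?, List.getLast?_eq_getElem?, List.getElem?_eq_getElem (by omega)]

theorem pvMidFlat (mid : List String) :
    ((mid.flatMap (fun p => [if p = "" then "%2C" else "%20", p])).map String.toList).flatten
      = (mid.map String.toList).flatMap
          (fun q => (if q = [] then "%2C".toList else "%20".toList) ++ q) := by
  induction mid with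
  | nil => rfl
  | cons p rest ih =>
      simp only [List.flatMap_cons, List.map_append, List.flatten_append, ih, List.map_cons]
      congr 1
      by_cases hp : p = ""
      · simp [hp]
      · rw [if_neg hp, if_neg (fun hh => hp (String.toList_eq_nil_iff.mp hh))]
        simp

theorem pvToList_getLastD (parts : List String) (h : parts ≠ []) :
    (parts.getLastD "").toList = (parts.map String.toList).getLastD [] := by
  induction parts with
  | nil => simp at h
  | cons p rest ih =>
      cases rest with
      | nil => simp
      | cons q u => simpa using ih (by simp)

-- B's value, char by char, in terms of pvSplit1
theorem pvB_toList (s : String) :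
    (get_query_url_with_percetange_alt s).toList
      = (if (pvSplit1 s.toList).length = 1 then s.toList
         else (pvSplit1 s.toList).headD [] ++ pvGlue (pvSplit1 s.toList).tail) := by
  have hmap := PySem.Str.split?_map s "-"
  rw [show ("-" : String).toList = ['-'] from rfl, PySem.Chars.split?] at hmap
  rw [if_neg (by simp), pvSplitOn_eq] at hmap
  cases hsp : PySem.Str.split? s "-" with
  | none => rw [hsp] at hmap; simp at hmap
  | some parts =>
      rw [hsp] at hmap
      simp only [Option.map_some, Option.some.injEq] at hmap
      have hlen : parts.length = (pvSplit1 s.toList).length := by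
        rw [← hmap, List.length_map]
      have hpne : parts ≠ [] := by
        intro hh
        exact pvSplit1_ne_nil s.toList (by rw [← hmap, hh]; rfl)
      unfold get_query_url_with_percetange_alt
      rw [hsp]
      simp only [Option.getD_some]
      by_cases h1 : parts.length = 1
      · rw [if_pos h1, if_pos (by omega)]
      · rw [if_neg h1, if_neg (by omega)]
        cases hparts : parts with
        | nil => exact absurd hparts hpne
        | cons p0 rest =>
            have hrne : rest ≠ [] := by
              intro hh; rw [hparts, hh] at h1; exact h1 rfl
            rw [PySem.List.foldl_append_eq_flatMap, pvSlice_mid]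
            rw [PySem.Str.toList_join, PySem.Chars.join,
              show ("" : String).toList = ([] : List Char) from rfl, pvIntercalateNil]
            rw [pvGetD0, pvGetDneg1 _ _ (by simp)]
            simp only [List.map_append, List.map_cons, List.flatten_append, List.flatten_cons,
              List.tail_cons]
            rw [pvMidFlat]
            have htailB : pvGlue (pvSplit1 s.toList).tail
                = (rest.map String.toList).dropLast.flatMap
                    (fun q => (if q = [] then "%2C".toList else "%20".toList) ++ q)
                  ++ "%20".toList ++ (rest.map String.toList).getLastD [] := by
              have htl : (pvSplit1 s.toList).tail = rest.map String.toList := by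
                rw [← hmap, hparts]; rfl
              rw [htl, pvGlue_eq _ (by simpa using hrne)]
            have hhd : (pvSplit1 s.toList).headD [] = p0.toList := by
              rw [← hmap, hparts]; rfl
            rw [htailB, hhd]
            rw [pvToList_getLastD _ (by simp)]
            rw [List.map_dropLast]
            simp only [List.append_assoc, List.getLastD_eq_getLast?]
            cases rest with
            | nil => exact absurd rfl hrne
            | cons r rs =>
                simp only [List.map_cons, List.getLast?_cons_cons]
                rw [show (r.toList :: List.map String.toList rs)
                    = List.map String.toList (r :: rs) from rfl, List.getLast?_map]
                simp

-- ===== VERDICT (by name: the statement is the Claim_ definition above) =====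
theorem get_query_url_with_percetange_spec : Claim_equal_get_query_url_with_percetange := by
  intro s _
  unfold Spec_get_query_url_with_percetange
  apply String.toList_inj.mp
  rw [pvA_toList, pvB_toList]
  cases hsp : pvSplit1 s.toList with
  | nil => exact absurd hsp (pvSplit1_ne_nil s.toList)
  | cons p rest =>
      have hcs : s.toList = List.intercalate ['-'] (p :: rest) := by
        rw [← hsp, pvIntercalate_split1]
      have hp : '-' ∉ p := pvSplit1_no_dash s.toList p (by rw [hsp]; exact List.mem_cons_self)
      have hrest : ∀ q ∈ rest, '-' ∉ q := fun q hq =>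
        pvSplit1_no_dash s.toList q (by rw [hsp]; exact List.mem_cons_of_mem p hq)
      by_cases h1 : (p :: rest).length = 1
      · have hrnil : rest = [] := by
          cases rest with
          | nil => rfl
          | cons r rs => simp at h1
        rw [if_pos h1]
        subst hrnil
        rw [hcs]
        have h2 : List.intercalate ['-'] [p] = p := by simp [List.intercalate]
        rw [h2]
        have h3 := pvNextOut_append_no_dash p [] hp
        simpa [pvNextOut] using h3
      · rw [if_neg h1, hcs, pvMainChar rest p hp hrest]
        rfl
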